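-- pv_equiv track=rewrite | github.com/DrFayeunAgriStats/vivasense-backend | genetics-module/academic_interpretation.py | detect_analysis_domain
-- ===== SOURCE A (Python) =====
-- def detect_analysis_domain(column_names: list[str], module: str) -> str:
--     """
--     Infer the research domain from uploaded dataset column names.
--
--     Returns one of: "plant_breeding", "agronomy", "soil_science", "general".
--     Always returns "plant_breeding" for the genetic_parameters module.
--     """
--     if module == "genetic_parameters":
--         return "plant_breeding"
--     breeding_keywords = {"genotype", "variety", "cultivar", "accession", "line", "cross"}
--     agronomy_keywords = {
--         "fertilizer", "fertiliser", "nitrogen", "irrigation",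
--         "tillage", "spacing", "density", "rate", "dose",
--     }
--     soil_keywords = {
--         "soil", "ph", "organic", "carbon", "nitrogen", "texture",
--         "depth", "horizon", "moisture",
--     }
--     lower_cols = {c.lower() for c in column_names}
--     if any(kw in lower_cols for kw in breeding_keywords):
--         return "plant_breeding"
--     elif any(kw in lower_cols for kw in agronomy_keywords):
--         return "agronomy"
--     elif any(kw in lower_cols for kw in soil_keywords):
--         return "soil_science"
--     else:
--         return "general"
-- ===== SOURCE B (Python) =====
-- _RANK = {
--     # breeding -> 0
--     "genotype": 0, "variety": 0, "cultivar": 0, "accession": 0, "line": 0, "cross": 0,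
--     # agronomy -> 1 (the shared keyword 'nitrogen' ranks 1: agronomy outranks soil)
--     "fertilizer": 1, "fertiliser": 1, "nitrogen": 1, "irrigation": 1,
--     "tillage": 1, "spacing": 1, "density": 1, "rate": 1, "dose": 1,
--     # soil -> 2
--     "soil": 2, "ph": 2, "organic": 2, "carbon": 2, "texture": 2,
--     "depth": 2, "horizon": 2, "moisture": 2,
-- }
-- _DOMAINS = ("plant_breeding", "agronomy", "soil_science", "general")
--
-- def detect_analysis_domain(column_names: list[str], module: str) -> str:
--     if module == "genetic_parameters":
--         return "plant_breeding"
--     best = 3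
--     for c in column_names:
--         best = min(best, _RANK.get(c.lower(), 3))
--     return _DOMAINS[best]
-- ===== Notes on version B (the rewrite author's own statement) =====
-- stated objective: alternative
-- what changed: Replaces the three keyword sets and three staged any-scans with a numeric scheme: each column is mapped to a priority rank (0 breeding, 1 agronomy incl. 'nitrogen', 2 soil, 3 no match), a single running-min fold over the columns picks the best rank, and the answer is the domain tuple indexed by that minimum.
import Mathlib
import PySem

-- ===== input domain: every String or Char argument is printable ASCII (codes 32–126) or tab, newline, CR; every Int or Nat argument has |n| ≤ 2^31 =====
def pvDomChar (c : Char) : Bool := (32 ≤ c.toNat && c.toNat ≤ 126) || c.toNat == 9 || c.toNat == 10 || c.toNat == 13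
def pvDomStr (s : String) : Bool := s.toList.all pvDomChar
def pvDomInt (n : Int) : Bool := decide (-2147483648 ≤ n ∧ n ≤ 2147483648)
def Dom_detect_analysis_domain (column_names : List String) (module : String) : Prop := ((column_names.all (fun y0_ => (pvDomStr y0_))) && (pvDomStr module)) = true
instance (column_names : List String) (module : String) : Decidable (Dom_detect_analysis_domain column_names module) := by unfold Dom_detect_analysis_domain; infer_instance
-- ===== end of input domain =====

-- B replaces A's three keyword sets and three staged any-scans with a numeric scheme:
-- each column gets a priority rank (0 breeding, 1 agronomy — incl. the shared 'nitrogen' —,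
-- 2 soil, 3 no match), one running-min fold over the columns keeps the best rank, and the
-- result is the domain table indexed by that minimum (alternative decomposition, same cost).

-- ===== PORT A =====
def breedingKW : PySem.Set String :=
  PySem.Set.ofList ["genotype", "variety", "cultivar", "accession", "line", "cross"]
def agronomyKW : PySem.Set String :=
  PySem.Set.ofList ["fertilizer", "fertiliser", "nitrogen", "irrigation",
                    "tillage", "spacing", "density", "rate", "dose"]
def soilKW : PySem.Set String :=
  PySem.Set.ofList ["soil", "ph", "organic", "carbon", "nitrogen", "texture",
                    "depth", "horizon", "moisture"]

def detect_analysis_domain (column_names : List String) (module : String) : String :=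
  if module == "genetic_parameters" then "plant_breeding"
  else
    let lower_cols : PySem.Set String :=
      PySem.Set.ofList (column_names.map (fun c => PySem.Str.lower c))
    if breedingKW.any (fun kw => PySem.Set.contains lower_cols kw) then "plant_breeding"
    else if agronomyKW.any (fun kw => PySem.Set.contains lower_cols kw) then "agronomy"
    else if soilKW.any (fun kw => PySem.Set.contains lower_cols kw) then "soil_science"
    else "general"

-- ===== PORT B =====
-- B's _RANK dict; all ranks are the naturals 0..3, so Nat values are exact here.
def rankDict : PySem.Dict String Nat :=
  PySem.Dict.ofList
    [("genotype", 0), ("variety", 0), ("cultivar", 0),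
     ("accession", 0), ("line", 0), ("cross", 0),
     ("fertilizer", 1), ("fertiliser", 1), ("nitrogen", 1), ("irrigation", 1),
     ("tillage", 1), ("spacing", 1), ("density", 1), ("rate", 1), ("dose", 1),
     ("soil", 2), ("ph", 2), ("organic", 2), ("carbon", 2), ("texture", 2),
     ("depth", 2), ("horizon", 2), ("moisture", 2)]

-- B's _RANK.get(c.lower(), 3)
def colRank (c : String) : Nat := PySem.Dict.getD rankDict (PySem.Str.lower c) 3

def domainsTable : List String := ["plant_breeding", "agronomy", "soil_science", "general"]

def detect_analysis_domain_alt (column_names : List String) (module : String) : String :=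
  if module == "genetic_parameters" then "plant_breeding"
  else
    let best := column_names.foldl (fun b c => min b (colRank c)) 3
    -- _DOMAINS[best]: best is always in 0..3, so plain Nat indexing is exact
    domainsTable.getD best "general"

-- ===== PRECONDITION & SPEC =====
def Spec_detect_analysis_domain (column_names : List String) (module : String) (out : String) : Prop := out = detect_analysis_domain_alt column_names module
instance (column_names : List String) (module : String) (out : String) : Decidable (Spec_detect_analysis_domain column_names module out) := by unfold Spec_detect_analysis_domain; infer_instance

-- ===== CLAIM (what is proved, stated in full; the proofs are below) =====
def Claim_equal_detect_analysis_domain : Prop := ∀ (column_names : List String) (module : String), Dom_detect_analysis_domain column_names module → Spec_detect_analysis_domain column_names module (detect_analysis_domain column_names module)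

-- ===== LEMMAS AND PROOFS =====

-- rankDict as a literal Dict.mk (ofList evaluated)
theorem rankDict_mk : rankDict = PySem.Dict.mk
    [("genotype", 0), ("variety", 0), ("cultivar", 0),
     ("accession", 0), ("line", 0), ("cross", 0),
     ("fertilizer", 1), ("fertiliser", 1), ("nitrogen", 1), ("irrigation", 1),
     ("tillage", 1), ("spacing", 1), ("density", 1), ("rate", 1), ("dose", 1),
     ("soil", 2), ("ph", 2), ("organic", 2), ("carbon", 2), ("texture", 2),
     ("depth", 2), ("horizon", 2), ("moisture", 2)] := by decide

-- lookup hits rank 0 / 1 / 2 exactly on the corresponding keyword groups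
theorem rank0_iff (x : String) :
    PySem.Dict.get? rankDict x = some 0 ↔
      x = "genotype" ∨ x = "variety" ∨ x = "cultivar" ∨
      x = "accession" ∨ x = "line" ∨ x = "cross" := by
  rw [PySem.Dict.get?_eq_some_iff_mem_items rankDict x 0 (by decide), rankDict_mk]
  simp [Prod.ext_iff]

theorem rank1_iff (x : String) :
    PySem.Dict.get? rankDict x = some 1 ↔
      x = "fertilizer" ∨ x = "fertiliser" ∨ x = "nitrogen" ∨ x = "irrigation" ∨
      x = "tillage" ∨ x = "spacing" ∨ x = "density" ∨ x = "rate" ∨ x = "dose" := by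
  rw [PySem.Dict.get?_eq_some_iff_mem_items rankDict x 1 (by decide), rankDict_mk]
  simp [Prod.ext_iff]

theorem rank2_iff (x : String) :
    PySem.Dict.get? rankDict x = some 2 ↔
      x = "soil" ∨ x = "ph" ∨ x = "organic" ∨ x = "carbon" ∨
      x = "texture" ∨ x = "depth" ∨ x = "horizon" ∨ x = "moisture" := by
  rw [PySem.Dict.get?_eq_some_iff_mem_items rankDict x 2 (by decide), rankDict_mk]
  simp [Prod.ext_iff]

-- every stored rank is ≤ 2
theorem rank_le2 (x : String) (v : Nat) (h : PySem.Dict.get? rankDict x = some v) : v ≤ 2 := by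
  have hm := PySem.Dict.mem_items_of_get?_eq_some _ h
  have hv : v ∈ (PySem.Dict.items rankDict).map Prod.snd := List.mem_map_of_mem hm
  rw [rankDict_mk] at hv
  simp at hv
  omega

theorem colRank_le3 (c : String) : colRank c ≤ 3 := by
  rw [colRank, PySem.Dict.getD_eq_get?_getD]
  cases h : PySem.Dict.get? rankDict (PySem.Str.lower c) with
  | none => simp
  | some v => simpa using le_trans (rank_le2 _ _ h) (by omega)

theorem colRank_eq_iff (c : String) (v : Nat) (hv : v ≤ 2) :
    colRank c = v ↔ PySem.Dict.get? rankDict (PySem.Str.lower c) = some v := by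
  rw [colRank, PySem.Dict.getD_eq_get?_getD]
  cases h : PySem.Dict.get? rankDict (PySem.Str.lower c) with
  | none => simp; omega
  | some w => simp

-- the running-min fold
theorem foldmin_le_init (l : List String) (b : Nat) :
    l.foldl (fun b c => min b (colRank c)) b ≤ b := by
  induction l generalizing b with
  | nil => simp
  | cons c l ih => exact le_trans (ih _) (min_le_left _ _)

theorem foldmin_le_of_mem (l : List String) (b : Nat) (c : String) (hc : c ∈ l) :
    l.foldl (fun b c => min b (colRank c)) b ≤ colRank c := by
  induction l generalizing b with
  | nil => simp at hc
  | cons c' l ih =>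
    simp only [List.foldl_cons]
    rcases List.mem_cons.mp hc with rfl | hc
    · exact le_trans (foldmin_le_init l _) (min_le_right _ _)
    · exact ih _ hc

theorem foldmin_cases (l : List String) (b : Nat) :
    l.foldl (fun b c => min b (colRank c)) b = b ∨
      ∃ c ∈ l, l.foldl (fun b c => min b (colRank c)) b = colRank c := by
  induction l generalizing b with
  | nil => exact Or.inl rfl
  | cons c l ih =>
    simp only [List.foldl_cons]
    rcases ih (min b (colRank c)) with h | ⟨c', hc', h⟩
    · rcases min_cases b (colRank c) with ⟨he, _⟩ | ⟨he, _⟩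
      · exact Or.inl (h.trans he)
      · exact Or.inr ⟨c, List.mem_cons_self .., h.trans he⟩
    · exact Or.inr ⟨c', List.mem_cons_of_mem _ hc', h⟩

-- A's any-over-a-keyword-set tests ↔ an existential over the columns
theorem anyA_iff (ks : List String) (cols : List String) :
    ((PySem.Set.ofList ks).any
        (fun kw => PySem.Set.contains (PySem.Set.ofList (cols.map (fun c => PySem.Str.lower c))) kw)) = true ↔
      ∃ c ∈ cols, PySem.Str.lower c ∈ ks := by
  constructor
  · intro h
    obtain ⟨kw, hkw, hc⟩ := List.any_eq_true.mp h
    rw [PySem.Set.contains_iff, PySem.Set.mem_ofList, List.mem_map] at hc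
    obtain ⟨c, hc, rfl⟩ := hc
    exact ⟨c, hc, (PySem.Set.mem_ofList _ _).mp hkw⟩
  · rintro ⟨c, hc, hk⟩
    refine List.any_eq_true.mpr ⟨PySem.Str.lower c, (PySem.Set.mem_ofList _ _).mpr hk, ?_⟩
    rw [PySem.Set.contains_iff, PySem.Set.mem_ofList, List.mem_map]
    exact ⟨c, hc, rfl⟩

-- ===== VERDICT (by name: the statement is the Claim_ definition above) =====
theorem detect_analysis_domain_spec : Claim_equal_detect_analysis_domain := by
  intro cols module _
  unfold Spec_detect_analysis_domain detect_analysis_domain detect_analysis_domain_alt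
  by_cases hm : module == "genetic_parameters"
  · simp [hm]
  · simp only [hm, Bool.false_eq_true, if_false, breedingKW, agronomyKW, soilKW]
    simp only [anyA_iff, List.mem_cons, List.not_mem_nil, or_false]
    set m := cols.foldl (fun b c => min b (colRank c)) 3 with hmdef
    by_cases hPb : ∃ c ∈ cols,
        PySem.Str.lower c = "genotype" ∨ PySem.Str.lower c = "variety" ∨
        PySem.Str.lower c = "cultivar" ∨ PySem.Str.lower c = "accession" ∨
        PySem.Str.lower c = "line" ∨ PySem.Str.lower c = "cross"
    · obtain ⟨c, hc, hk⟩ := hPb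
      have hr : colRank c = 0 := (colRank_eq_iff c 0 (by omega)).mpr ((rank0_iff _).mpr hk)
      have hle := foldmin_le_of_mem cols 3 c hc
      rw [hr] at hle
      have hm0 : m = 0 := Nat.le_zero.mp hle
      rw [if_pos ⟨c, hc, hk⟩, hm0]
      simp [domainsTable]
    · have hne0 : m ≠ 0 := by
        intro h0
        rcases foldmin_cases cols 3 with he | ⟨c, hc, he⟩
        · omega
        · have : colRank c = 0 := by omega
          exact hPb ⟨c, hc, (rank0_iff _).mp ((colRank_eq_iff c 0 (by omega)).mp this)⟩
      by_cases hPa : ∃ c ∈ cols,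
          PySem.Str.lower c = "fertilizer" ∨ PySem.Str.lower c = "fertiliser" ∨
          PySem.Str.lower c = "nitrogen" ∨ PySem.Str.lower c = "irrigation" ∨
          PySem.Str.lower c = "tillage" ∨ PySem.Str.lower c = "spacing" ∨
          PySem.Str.lower c = "density" ∨ PySem.Str.lower c = "rate" ∨
          PySem.Str.lower c = "dose"
      · obtain ⟨c, hc, hk⟩ := hPa
        have hr : colRank c = 1 := (colRank_eq_iff c 1 (by omega)).mpr ((rank1_iff _).mpr hk)
        have hle := foldmin_le_of_mem cols 3 c hc
        rw [hr] at hle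
        have hm1 : m = 1 := by omega
        rw [if_neg hPb, if_pos ⟨c, hc, hk⟩, hm1]
        simp [domainsTable]
      · have hne1 : m ≠ 1 := by
          intro h1
          rcases foldmin_cases cols 3 with he | ⟨c, hc, he⟩
          · omega
          · have : colRank c = 1 := by omega
            exact hPa ⟨c, hc, (rank1_iff _).mp ((colRank_eq_iff c 1 (by omega)).mp this)⟩
        by_cases hPs : ∃ c ∈ cols,
            PySem.Str.lower c = "soil" ∨ PySem.Str.lower c = "ph" ∨
            PySem.Str.lower c = "organic" ∨ PySem.Str.lower c = "carbon" ∨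
            PySem.Str.lower c = "nitrogen" ∨ PySem.Str.lower c = "texture" ∨
            PySem.Str.lower c = "depth" ∨ PySem.Str.lower c = "horizon" ∨
            PySem.Str.lower c = "moisture"
        · obtain ⟨c, hc, hk⟩ := hPs
          have hk2 : PySem.Str.lower c = "soil" ∨ PySem.Str.lower c = "ph" ∨
              PySem.Str.lower c = "organic" ∨ PySem.Str.lower c = "carbon" ∨
              PySem.Str.lower c = "texture" ∨ PySem.Str.lower c = "depth" ∨
              PySem.Str.lower c = "horizon" ∨ PySem.Str.lower c = "moisture" := by
            rcases hk with h|h|h|h|h|h|h|h|h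
            · exact Or.inl h
            · exact Or.inr (Or.inl h)
            · exact Or.inr (Or.inr (Or.inl h))
            · exact Or.inr (Or.inr (Or.inr (Or.inl h)))
            · exact absurd ⟨c, hc, Or.inr (Or.inr (Or.inl h))⟩ hPa
            · exact Or.inr (Or.inr (Or.inr (Or.inr (Or.inl h))))
            · exact Or.inr (Or.inr (Or.inr (Or.inr (Or.inr (Or.inl h)))))
            · exact Or.inr (Or.inr (Or.inr (Or.inr (Or.inr (Or.inr (Or.inl h))))))
            · exact Or.inr (Or.inr (Or.inr (Or.inr (Or.inr (Or.inr (Or.inr h))))))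
          have hr : colRank c = 2 := (colRank_eq_iff c 2 (by omega)).mpr ((rank2_iff _).mpr hk2)
          have hle := foldmin_le_of_mem cols 3 c hc
          rw [hr] at hle
          have hm2 : m = 2 := by omega
          rw [if_neg hPb, if_neg hPa, if_pos ⟨c, hc, hk⟩, hm2]
          simp [domainsTable]
        · have hm3 : m = 3 := by
            rcases foldmin_cases cols 3 with he | ⟨c, hc, he⟩
            · exact he
            · have h3 := colRank_le3 c
              rcases Nat.lt_or_ge (colRank c) 3 with hlt | hge
              · exfalso
                have hv2 : colRank c ≤ 2 := by omega
                have hg := (colRank_eq_iff c (colRank c) hv2).mp rfl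
                rcases Nat.lt_or_ge (colRank c) 1 with h0 | h1
                · have : colRank c = 0 := by omega
                  rw [this] at hg
                  exact hPb ⟨c, hc, (rank0_iff _).mp hg⟩
                · rcases Nat.lt_or_ge (colRank c) 2 with h1' | h2
                  · have : colRank c = 1 := by omega
                    rw [this] at hg
                    exact hPa ⟨c, hc, (rank1_iff _).mp hg⟩
                  · have : colRank c = 2 := by omega
                    rw [this] at hg
                    have hk2 := (rank2_iff _).mp hg
                    refine hPs ⟨c, hc, ?_⟩
                    rcases hk2 with h|h|h|h|h|h|h|h
                    · exact Or.inl h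
                    · exact Or.inr (Or.inl h)
                    · exact Or.inr (Or.inr (Or.inl h))
                    · exact Or.inr (Or.inr (Or.inr (Or.inl h)))
                    · exact Or.inr (Or.inr (Or.inr (Or.inr (Or.inr (Or.inl h)))))
                    · exact Or.inr (Or.inr (Or.inr (Or.inr (Or.inr (Or.inr (Or.inl h))))))
                    · exact Or.inr (Or.inr (Or.inr (Or.inr (Or.inr (Or.inr (Or.inr (Or.inl h)))))))
                    · exact Or.inr (Or.inr (Or.inr (Or.inr (Or.inr (Or.inr (Or.inr (Or.inr h)))))))
              · omega
          rw [if_neg hPb, if_neg hPa, if_neg hPs, hm3]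
          simp [domainsTable]
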